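-- pv_equiv track=rewrite | github.com/explosion/spacy-transformers | spacy_transformers/_tokenizers.py | fix_alignment
-- ===== SOURCE A (Python) =====
-- def fix_alignment(segments):
--     """Turn a nested segment alignment into an alignment for the whole input,
--     by offsetting and accounting for special tokens."""
--     offset = 0
--     output = []
--     for segment in segments:
--         if segment:
--             offset += 1
--         seen = set()
--         for idx_group in segment:
--             output.append([idx + offset for idx in idx_group])
--             seen.update({idx for idx in idx_group})
--         offset += len(seen)
--     return output
-- ===== SOURCE B (Python) =====
-- def fix_alignment(segments):
--     """Two-pass version: first compute each segment's offset weight and the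
--     running base offsets, then emit the shifted groups."""
--     weights = [(1 if seg else 0) + len({i for g in seg for i in g}) for seg in segments]
--     bases = []
--     acc = 0
--     for w in weights:
--         bases.append(acc)
--         acc += w
--     out = []
--     for seg, base in zip(segments, bases):
--         shift = base + (1 if seg else 0)
--         for g in seg:
--             out.append([i + shift for i in g])
--     return out
-- ===== Notes on version B (the rewrite author's own statement) =====
-- stated objective: alternative
-- what changed: Replaced the single fused loop threading a mutable offset with two separate passes: one computing per-segment weights and a prefix-sum table of base offsets, and one emitting the shifted groups from that table.
import Mathlib
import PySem

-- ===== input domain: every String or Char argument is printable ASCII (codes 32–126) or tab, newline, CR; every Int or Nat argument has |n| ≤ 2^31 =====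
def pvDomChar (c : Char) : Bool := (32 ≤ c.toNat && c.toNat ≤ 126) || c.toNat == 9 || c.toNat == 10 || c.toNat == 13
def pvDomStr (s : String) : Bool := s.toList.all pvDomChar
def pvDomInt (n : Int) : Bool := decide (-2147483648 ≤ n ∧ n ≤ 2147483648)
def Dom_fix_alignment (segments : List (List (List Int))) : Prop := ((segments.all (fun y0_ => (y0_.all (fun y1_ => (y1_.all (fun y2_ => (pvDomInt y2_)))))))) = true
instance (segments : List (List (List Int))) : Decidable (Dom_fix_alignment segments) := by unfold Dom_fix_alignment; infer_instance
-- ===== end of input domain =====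

-- B computes the result in two passes (per-segment weights + prefix-sum base table, then emission)
-- instead of A's single fused loop threading a mutable offset; an alternative decomposition, same cost.


-- ===== PORT A =====
-- inner loop body: output.append([idx + offset for idx in idx_group]); seen.update({idx for idx in idx_group})
def pyInnerStep (offset : Int) (p : List (List Int) × PySem.Set Int) (idx_group : List Int) :
    List (List Int) × PySem.Set Int :=
  (p.1 ++ [idx_group.map (fun idx => idx + offset)],
   PySem.Set.update p.2 (PySem.Set.ofList idx_group))

-- outer loop body over one segment, state = (offset, output)
def pyOuterStep (st : Int × List (List Int)) (segment : List (List Int)) :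
    Int × List (List Int) :=
  let offset := if segment.isEmpty then st.1 else st.1 + 1
  let inner := segment.foldl (pyInnerStep offset) (st.2, PySem.Set.empty)
  (offset + PySem.Set.len inner.2, inner.1)

def fix_alignment (segments : List (List (List Int))) : List (List Int) :=
  (segments.foldl pyOuterStep (0, [])).2

-- ===== PORT B =====
-- weight = (1 if seg else 0) + len({i for g in seg for i in g})
def segWeight (seg : List (List Int)) : Int :=
  (if seg.isEmpty then 0 else 1) + PySem.Set.len (PySem.Set.ofList seg.flatten)

-- bases: running sum, bases[k] = sum of weights before k
def mkBases (start : Int) : List Int → List Int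
  | [] => []
  | w :: ws => start :: mkBases (start + w) ws

-- second pass: emit the shifted groups of each (segment, base) pair
def emitSegs : List ((List (List Int)) × Int) → List (List Int)
  | [] => []
  | (seg, base) :: rest =>
      let shift := base + (if seg.isEmpty then 0 else 1)
      seg.map (fun g => g.map (fun i => i + shift)) ++ emitSegs rest

def fix_alignment_alt (segments : List (List (List Int))) : List (List Int) :=
  emitSegs (segments.zip (mkBases 0 (segments.map segWeight)))

-- ===== PRECONDITION & SPEC =====
def Spec_fix_alignment (segments : List (List (List Int))) (out : List (List Int)) : Prop := out = fix_alignment_alt segments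
instance (segments : List (List (List Int))) (out : List (List Int)) : Decidable (Spec_fix_alignment segments out) := by unfold Spec_fix_alignment; infer_instance

-- ===== CLAIM (what is proved, stated in full; the proofs are below) =====
def Claim_equal_fix_alignment : Prop := ∀ (segments : List (List (List Int))), Dom_fix_alignment segments → Spec_fix_alignment segments (fix_alignment segments)

-- ===== LEMMAS AND PROOFS =====

-- updating with set(g) is the same as updating with g itself
theorem update_ofList (s g : List Int) :
    PySem.Set.update s (PySem.Set.ofList g) = PySem.Set.update s g := by
  induction g using List.reverseRecOn generalizing s with
  | nil => rfl
  | append_singleton xs x ih =>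
      rw [PySem.Set.ofList_append_singleton]
      by_cases hx : x ∈ PySem.Set.ofList xs
      · have hx' : x ∈ PySem.Set.update s xs := by
          rw [PySem.Set.mem_update]; right; exact (PySem.Set.mem_ofList xs x).1 hx
        rw [PySem.Set.add_of_mem hx, ih, PySem.Set.update_append,
            PySem.Set.update_cons, PySem.Set.update_nil, PySem.Set.add_of_mem hx']
      · rw [PySem.Set.add_of_not_mem hx, PySem.Set.update_append, ih,
            PySem.Set.update_append]

-- the inner loop appends the shifted groups and accumulates the seen set
theorem inner_loop_eq (groups : List (List Int)) (off : Int)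
    (out : List (List Int)) (seen : PySem.Set Int) :
    groups.foldl (pyInnerStep off) (out, seen) =
      (out ++ groups.map (fun g => g.map (fun i => i + off)),
       PySem.Set.update seen groups.flatten) := by
  induction groups generalizing out seen with
  | nil => simp [PySem.Set.update_nil]
  | cons g rest ih =>
      simp only [List.foldl_cons, pyInnerStep, update_ofList]
      rw [ih]
      simp [PySem.Set.update_append]

-- the outer loop equals the two-pass emission from base offsets
theorem outer_loop_eq (segs : List (List (List Int))) (off : Int) (out : List (List Int)) :
    (segs.foldl pyOuterStep (off, out)).2 =
      out ++ emitSegs (segs.zip (mkBases off (segs.map segWeight))) := by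
  induction segs generalizing off out with
  | nil => simp [emitSegs]
  | cons seg rest ih =>
      simp only [List.foldl_cons, List.map_cons, mkBases, List.zip_cons_cons, emitSegs]
      have hstep : pyOuterStep (off, out) seg =
          (off + segWeight seg,
           out ++ seg.map (fun g => g.map (fun i => i + (off + (if seg.isEmpty then 0 else 1))))) := by
        simp only [pyOuterStep, inner_loop_eq, segWeight]
        have hseen : PySem.Set.update ([] : PySem.Set Int) seg.flatten
            = PySem.Set.ofList seg.flatten := by
          rw [PySem.Set.ofList_eq_foldl]; rfl
        by_cases h : seg.isEmpty
        · have hseg : seg = [] := List.isEmpty_iff.mp h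
          subst hseg; simp [PySem.Set.len, PySem.Set.update_nil, PySem.Set.empty]
        · simp [h, hseen]; ring_nf
      rw [hstep, ih]
      by_cases h : seg.isEmpty <;> simp [h, List.append_assoc]

-- ===== VERDICT (by name: the statement is the Claim_ definition above) =====
theorem fix_alignment_spec : Claim_equal_fix_alignment := by
  intro segments _
  unfold Spec_fix_alignment fix_alignment fix_alignment_alt
  rw [outer_loop_eq]
  simp
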